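-- pv_equiv track=rewrite | github.com/Louis-He/earthquake-warning-IEWS | dataAnalysis.py | clusterSingleEvent
-- ===== SOURCE A (Python) =====
-- def clusterSingleEvent(boolSeq, tolerence):
--     originalSeq = boolSeq.copy()
--
--     # clutser single event
--     for i in range(len(boolSeq)):
--         if(boolSeq[i] == False):
--             if(i > 0 and originalSeq[i - 1] == True):
--                 boolSeq[i] = True
--             else:
--                 for j in range(-tolerence + 1, tolerence):
--                     if(i + j >= 0 and i + j < len(boolSeq) and originalSeq[i + j] == True):
--                         boolSeq[i] = True
--
--     return boolSeq
-- ===== SOURCE B (Python) =====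
-- def clusterSingleEvent(boolSeq, tolerence):
--     n = len(boolSeq)
--     prefix = [0] * (n + 1)
--     for k in range(n):
--         prefix[k + 1] = prefix[k] + (1 if boolSeq[k] else 0)
--     out = []
--     for i in range(n):
--         if boolSeq[i]:
--             out.append(True)
--         elif i > 0 and boolSeq[i - 1]:
--             out.append(True)
--         elif tolerence >= 1:
--             lo = max(0, i - tolerence + 1)
--             hi = min(n, i + tolerence)
--             out.append(prefix[hi] > prefix[lo])
--         else:
--             out.append(False)
--     boolSeq[:] = out
--     return boolSeq
-- ===== Notes on version B (the rewrite author's own statement) =====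
-- stated objective: faster
-- what changed: Replaced the O(tolerance) inner scan per False entry with a prefix-sum array of True counts built once, so each position checks its tolerance window with one O(1) prefix comparison.
import Mathlib
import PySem

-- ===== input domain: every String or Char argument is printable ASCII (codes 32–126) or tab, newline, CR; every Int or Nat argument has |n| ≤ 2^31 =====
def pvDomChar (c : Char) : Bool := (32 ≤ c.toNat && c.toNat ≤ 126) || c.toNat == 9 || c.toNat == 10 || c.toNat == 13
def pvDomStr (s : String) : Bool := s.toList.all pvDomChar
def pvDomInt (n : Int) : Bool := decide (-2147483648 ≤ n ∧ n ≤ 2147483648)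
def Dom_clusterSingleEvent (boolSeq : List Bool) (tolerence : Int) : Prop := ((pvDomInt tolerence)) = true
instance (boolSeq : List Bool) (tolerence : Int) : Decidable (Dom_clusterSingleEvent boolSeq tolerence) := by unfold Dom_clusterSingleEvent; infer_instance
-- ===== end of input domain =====

-- B replaces A's per-element window scan by a prefix-sum of True counts built once, with an
-- O(1) window check per element; equivalence is about the RETURN value (both Pythons also
-- mutate boolSeq in place to that same value).

-- ===== PORT A =====
-- literal port of A; boolSeq[i] = True is pySetD (i comes from range(len(boolSeq)), always in range)
def clusterSingleEvent (boolSeq : List Bool) (tolerence : Int) : List Bool :=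
  let originalSeq := boolSeq
  (PySem.List.pyRange 0 (PySem.List.len boolSeq) 1).foldl (fun bs i =>
    if PySem.List.pyGetD bs i true = false then
      if i > 0 ∧ PySem.List.pyGetD originalSeq (i - 1) false = true then
        PySem.List.pySetD bs i true
      else
        (PySem.List.pyRange (-tolerence + 1) tolerence 1).foldl (fun bs2 j =>
          if i + j ≥ 0 ∧ i + j < PySem.List.len bs2 ∧
              PySem.List.pyGetD originalSeq (i + j) false = true then
            PySem.List.pySetD bs2 i true
          else bs2) bs
    else bs) boolSeq

-- ===== PORT B =====
-- the prefix-sum loop of Source B: altPrefix bs s = prefix[1..] built from running sum s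
def altPrefix : List Bool → Int → List Int
  | [], _ => []
  | b :: rest, s =>
      let s' := s + (if b then 1 else 0)
      s' :: altPrefix rest s'

def clusterSingleEvent_alt (boolSeq : List Bool) (tolerence : Int) : List Bool :=
  let n : Int := PySem.List.len boolSeq
  let pref : List Int := 0 :: altPrefix boolSeq 0
  (PySem.List.pyRange 0 n 1).foldl (fun out i =>
    let v : Bool :=
      if PySem.List.pyGetD boolSeq i false then true
      else if i > 0 ∧ PySem.List.pyGetD boolSeq (i - 1) false = true then true
      else if tolerence ≥ 1 then
        decide (PySem.List.pyGetD pref (min n (i + tolerence)) 0 >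
                PySem.List.pyGetD pref (max 0 (i - tolerence + 1)) 0)
      else false
    out ++ [v]) []

-- ===== PRECONDITION & SPEC =====
def Spec_clusterSingleEvent (boolSeq : List Bool) (tolerence : Int) (out : List Bool) : Prop := out = clusterSingleEvent_alt boolSeq tolerence
instance (boolSeq : List Bool) (tolerence : Int) (out : List Bool) : Decidable (Spec_clusterSingleEvent boolSeq tolerence out) := by unfold Spec_clusterSingleEvent; infer_instance

-- ===== CLAIM (what is proved, stated in full; the proofs are below) =====
def Claim_equal_clusterSingleEvent : Prop := ∀ (boolSeq : List Bool) (tolerence : Int), Dom_clusterSingleEvent boolSeq tolerence → Spec_clusterSingleEvent boolSeq tolerence (clusterSingleEvent boolSeq tolerence)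

-- ===== LEMMAS AND PROOFS =====

-- the value A leaves at position i (proved to be A's result pointwise in A_char)
def specVal (bs : List Bool) (tol : Int) (i : Nat) : Bool :=
  bs.getD i false ||
  (decide (0 < i) && bs.getD (i - 1) false) ||
  (PySem.List.pyRange (-tol + 1) tol 1).any (fun j =>
     decide (((i : Int) + j ≥ 0) ∧ ((i : Int) + j < (bs.length : Int)) ∧
       PySem.List.pyGetD bs ((i : Int) + j) false = true))

-- the value B appends at position i (proved to be B's result pointwise in B_char)
def altVal (bs : List Bool) (tol : Int) (i : Nat) : Bool :=
  if bs.getD i false then true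
  else if decide (0 < i) && bs.getD (i - 1) false then true
  else if tol ≥ 1 then
    decide (PySem.List.pyGetD (0 :: altPrefix bs 0) (min (bs.length : Int) ((i : Int) + tol)) 0 >
            PySem.List.pyGetD (0 :: altPrefix bs 0) (max 0 ((i : Int) - tol + 1)) 0)
  else false

-- A's loop body, named so the fold can be reasoned about
def stepA (orig : List Bool) (tol : Int) (bs : List Bool) (i : Int) : List Bool :=
  if PySem.List.pyGetD bs i true = false then
    if i > 0 ∧ PySem.List.pyGetD orig (i - 1) false = true then
      PySem.List.pySetD bs i true
    else
      (PySem.List.pyRange (-tol + 1) tol 1).foldl (fun bs2 j =>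
        if i + j ≥ 0 ∧ i + j < PySem.List.len bs2 ∧
            PySem.List.pyGetD orig (i + j) false = true then
          PySem.List.pySetD bs2 i true
        else bs2) bs
  else bs

-- B's per-index value over an Int index, named so the fold can be reasoned about
def altValI (bs : List Bool) (tol : Int) (i : Int) : Bool :=
  if PySem.List.pyGetD bs i false then true
  else if i > 0 ∧ PySem.List.pyGetD bs (i - 1) false = true then true
  else if tol ≥ 1 then
    decide (PySem.List.pyGetD (0 :: altPrefix bs 0) (min (PySem.List.len bs) (i + tol)) 0 >
            PySem.List.pyGetD (0 :: altPrefix bs 0) (max 0 (i - tol + 1)) 0)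
  else false

theorem set_getD (r : List Bool) (m k : Nat) (v : Bool) (hm : m < r.length) :
    (r.set m v).getD k false = if k = m then v else r.getD k false := by
  simp only [List.getD_eq_getElem?_getD, List.getElem?_set]
  rcases eq_or_ne k m with h | h
  · subst h
    rw [if_pos rfl, if_pos hm, if_pos rfl, Option.getD_some]
  · rw [if_neg (fun hc => h hc.symm), if_neg h]

theorem innerA (orig : List Bool) (mI : Int) (hmI : 0 ≤ mI) (l : List Int) :
    ∀ (r : List Bool), r.length = orig.length →
    l.foldl (fun bs2 j =>
      if mI + j ≥ 0 ∧ mI + j < PySem.List.len bs2 ∧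
          PySem.List.pyGetD orig (mI + j) false = true then
        PySem.List.pySetD bs2 mI true
      else bs2) r
    = if l.any (fun j => decide (mI + j ≥ 0 ∧ mI + j < (orig.length : Int) ∧
        PySem.List.pyGetD orig (mI + j) false = true)) then
        PySem.List.pySetD r mI true
      else r := by
  induction l with
  | nil => intro r _; simp
  | cons j l ih =>
    intro r hlen
    rw [List.foldl_cons, List.any_cons]
    by_cases hc : mI + j ≥ 0 ∧ mI + j < (orig.length : Int) ∧
        PySem.List.pyGetD orig (mI + j) false = true
    · rw [if_pos (by rw [PySem.List.len_eq, hlen]; exact hc)]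
      rw [ih _ (by rw [PySem.List.length_pySetD]; exact hlen)]
      rw [decide_eq_true hc]
      simp only [Bool.true_or, if_pos trivial]
      split_ifs with h
      · simp only [PySem.List.pySetD_of_nonneg _ _ hmI, List.set_set]
      · rfl
    · rw [if_neg (by rw [PySem.List.len_eq, hlen]; exact hc)]
      rw [ih _ hlen, decide_eq_false hc]
      simp only [Bool.false_or]

theorem stepA_spec (orig : List Bool) (tol : Int) (m : Nat) (r : List Bool)
    (hm : m < orig.length) (hlen : r.length = orig.length)
    (hr : r.getD m false = orig.getD m false) :
    (stepA orig tol r ((m : Nat) : Int)).length = orig.length ∧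
    ∀ k : Nat, (stepA orig tol r ((m : Nat) : Int)).getD k false =
      if k = m then specVal orig tol m else r.getD k false := by
  have hmr : m < r.length := by omega
  have hget : PySem.List.pyGetD r ((m : Nat) : Int) true = r.getD m false := by
    rw [PySem.List.pyGetD_natCast, List.getD_eq_getElem _ _ hmr, List.getD_eq_getElem _ _ hmr]
  unfold stepA
  by_cases horig : orig.getD m false = true
  · rw [if_neg (by rw [hget, hr, horig]; simp)]
    refine ⟨hlen, fun k => ?_⟩
    split_ifs with hk
    · subst hk
      rw [hr, horig]
      unfold specVal
      rw [horig]
      simp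
    · rfl
  · have horig' : orig.getD m false = false := by simpa using horig
    rw [if_pos (by rw [hget, hr, horig'])]
    have hspec1 : specVal orig tol m =
        ((decide (0 < m) && orig.getD (m - 1) false) ||
          (PySem.List.pyRange (-tol + 1) tol 1).any (fun j =>
            decide (((m : Int) + j ≥ 0) ∧ ((m : Int) + j < (orig.length : Int)) ∧
              PySem.List.pyGetD orig ((m : Int) + j) false = true))) := by
      unfold specVal
      rw [horig']
      simp
    by_cases h2 : ((m : Nat) : Int) > 0 ∧ PySem.List.pyGetD orig (((m : Nat) : Int) - 1) false = true
    · rw [if_pos h2]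
      have hm0 : 0 < m := by exact_mod_cast h2.1
      have hcast : ((m : Nat) : Int) - 1 = ((m - 1 : Nat) : Int) := by omega
      have h2' : orig.getD (m - 1) false = true := by
        have := h2.2
        rw [hcast, PySem.List.pyGetD_natCast] at this
        exact this
      have hspec : specVal orig tol m = true := by
        rw [hspec1, h2', decide_eq_true hm0]
        simp
      rw [PySem.List.pySetD_natCast]
      refine ⟨by simpa using hlen, fun k => ?_⟩
      rw [set_getD r m k true hmr, hspec]
    · rw [if_neg h2]
      rw [innerA orig _ (by positivity) _ r hlen]
      have h2f : (decide (0 < m) && orig.getD (m - 1) false) = false := by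
        by_cases hm0 : 0 < m
        · have hcast : ((m : Nat) : Int) - 1 = ((m - 1 : Nat) : Int) := by omega
          have : ¬ PySem.List.pyGetD orig (((m : Nat) : Int) - 1) false = true := by
            intro hx; exact h2 ⟨by exact_mod_cast hm0, hx⟩
          rw [hcast, PySem.List.pyGetD_natCast] at this
          have hx : orig.getD (m - 1) false = false := by simpa using this
          rw [List.getD_eq_getElem?_getD] at hx
          simp [hx]
        · simp [hm0]
      have hspec : specVal orig tol m =
          (PySem.List.pyRange (-tol + 1) tol 1).any (fun j =>
            decide (((m : Int) + j ≥ 0) ∧ ((m : Int) + j < (orig.length : Int)) ∧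
              PySem.List.pyGetD orig ((m : Int) + j) false = true)) := by
        rw [hspec1, h2f]
        simp
      split_ifs with hany
      · rw [PySem.List.pySetD_natCast]
        refine ⟨by simpa using hlen, fun k => ?_⟩
        rw [set_getD r m k true hmr, hspec, hany]
      · refine ⟨hlen, fun k => ?_⟩
        split_ifs with hk
        · subst hk
          rw [hspec, hr, horig']
          exact (Bool.eq_false_iff.mpr hany).symm
        · rfl

theorem outerA (orig : List Bool) (tol : Int) :
    ∀ (cnt m : Nat) (r : List Bool), m + cnt = orig.length → r.length = orig.length →
    (∀ k : Nat, r.getD k false = if k < m then specVal orig tol k else orig.getD k false) →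
    (((List.range' m cnt).map (fun t : Nat => (t : Int))).foldl (stepA orig tol) r).length = orig.length ∧
    ∀ k : Nat, (((List.range' m cnt).map (fun t : Nat => (t : Int))).foldl (stepA orig tol) r).getD k false =
      if k < m + cnt then specVal orig tol k else orig.getD k false := by
  intro cnt
  induction cnt with
  | zero =>
    intro m r hsum hlen hinv
    simpa using ⟨hlen, hinv⟩
  | succ c ih =>
    intro m r hsum hlen hinv
    rw [List.range'_succ, List.map_cons, List.foldl_cons]
    have hm : m < orig.length := by omega
    have hr : r.getD m false = orig.getD m false := by
      rw [hinv m, if_neg (by omega)]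
    obtain ⟨hlen', hpt⟩ := stepA_spec orig tol m r hm hlen hr
    have hinv' : ∀ k : Nat, (stepA orig tol r ((m : Nat) : Int)).getD k false =
        if k < m + 1 then specVal orig tol k else orig.getD k false := by
      intro k
      rw [hpt k]
      rcases eq_or_ne k m with h | h
      · subst h; rw [if_pos rfl, if_pos (by omega)]
      · rw [if_neg h, hinv k]
        rcases Nat.lt_or_ge k m with h' | h'
        · rw [if_pos h', if_pos (by omega)]
        · rw [if_neg (by omega), if_neg (by omega)]
    have := ih (m + 1) _ (by omega) hlen' hinv'
    refine ⟨this.1, fun k => ?_⟩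
    rw [this.2 k, show m + 1 + c = m + (c + 1) from by omega]

theorem A_char (bs : List Bool) (tol : Int) :
    clusterSingleEvent bs tol = (List.range bs.length).map (specVal bs tol) := by
  show (PySem.List.pyRange 0 (PySem.List.len bs) 1).foldl (stepA bs tol) bs = _
  rw [PySem.List.len_eq, PySem.List.pyRange_zero_nat, List.range_eq_range']
  obtain ⟨hlen, hpt⟩ := outerA bs tol bs.length 0 bs (by omega) rfl
    (fun k => by rw [if_neg (by omega)])
  apply List.ext_getElem (by simp [hlen])
  intro k h1 h2
  have hkn : k < bs.length := by simpa [hlen] using h1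
  have := hpt k
  rw [if_pos (by omega), List.getD_eq_getElem _ _ h1] at this
  rw [this]
  simp

theorem altValI_eq (bs : List Bool) (tol : Int) (i : Nat) :
    altValI bs tol (i : Int) = altVal bs tol i := by
  unfold altValI altVal
  rw [PySem.List.pyGetD_natCast, PySem.List.len_eq]
  rcases Nat.eq_zero_or_pos i with h0 | h0
  · subst h0
    by_cases hc1 : bs.getD 0 false = true
    · rw [if_pos hc1, if_pos hc1]
    · rw [if_neg hc1, if_neg hc1,
        if_neg (fun hc : ((0 : Nat) : Int) > 0 ∧ _ => by norm_num at hc),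
        if_neg (by simp : ¬ (decide (0 < 0) && bs.getD (0 - 1) false) = true)]
  · have hcast : ((i : Nat) : Int) - 1 = ((i - 1 : Nat) : Int) := by omega
    rw [hcast, PySem.List.pyGetD_natCast]
    by_cases hc1 : bs.getD i false = true
    · rw [if_pos hc1, if_pos hc1]
    · rw [if_neg hc1, if_neg hc1]
      by_cases hprev : bs.getD (i - 1) false = true
      · rw [if_pos ⟨by exact_mod_cast h0, hprev⟩,
          if_pos (by rw [hprev, decide_eq_true h0]; rfl)]
      · rw [if_neg (fun hc => hprev hc.2)]
        have hb : (decide (0 < i) && bs.getD (i - 1) false) = false := by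
          have hx : bs[i - 1]?.getD false = false := by
            rw [← List.getD_eq_getElem?_getD]; exact Bool.eq_false_iff.mpr hprev
          simp [hx]
        rw [hb, if_neg (by simp : ¬ (false = true))]

theorem B_char (bs : List Bool) (tol : Int) :
    clusterSingleEvent_alt bs tol = (List.range bs.length).map (altVal bs tol) := by
  show (PySem.List.pyRange 0 (PySem.List.len bs) 1).foldl
      (fun out i => out ++ [altValI bs tol i]) [] = _
  rw [PySem.List.foldl_append_singleton_eq_map, PySem.List.len_eq,
    PySem.List.pyRange_zero_nat, List.map_map, List.nil_append]
  exact List.map_congr_left (fun i _ => altValI_eq bs tol i)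

theorem altPrefix_getD (bs : List Bool) (s : Int) (k : Nat) (hk : k < bs.length) :
    (altPrefix bs s).getD k 0 = s + ((bs.take (k + 1)).countP (fun b => b) : Int) := by
  induction bs generalizing s k with
  | nil => simp at hk
  | cons b rest ih =>
    cases k with
    | zero =>
      cases b <;> simp [altPrefix]
    | succ t =>
      simp only [altPrefix, List.getD_cons_succ]
      rw [ih _ t (by simpa using hk)]
      simp [List.take_succ_cons, List.countP_cons]
      cases b <;> simp <;> ring

theorem prefAt (bs : List Bool) (k : Nat) (hk : k ≤ bs.length) :
    PySem.List.pyGetD (0 :: altPrefix bs 0) (k : Int) 0 = ((bs.take k).countP (fun b => b) : Int) := by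
  rw [PySem.List.pyGetD_natCast]
  cases k with
  | zero => simp
  | succ t =>
    simp only [List.getD_cons_succ]
    rw [altPrefix_getD bs 0 t (by omega)]
    simp

theorem count_window (bs : List Bool) (lo hi : Nat) (hlh : lo ≤ hi) (hhn : hi ≤ bs.length) :
    ((bs.take lo).countP (fun b => b) < (bs.take hi).countP (fun b => b)) ↔
      ∃ k : Nat, lo ≤ k ∧ k < hi ∧ bs.getD k false = true := by
  have hsplit : bs.take hi = bs.take lo ++ (bs.drop lo).take (hi - lo) := by
    rw [← List.take_add]; congr 1; omega
  rw [hsplit, List.countP_append]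
  constructor
  · intro h
    have hpos : 0 < ((bs.drop lo).take (hi - lo)).countP (fun b => b) := by omega
    rw [List.countP_pos_iff] at hpos
    obtain ⟨a, ha, hat⟩ := hpos
    obtain ⟨t, ht, hval⟩ := List.mem_iff_getElem.mp ha
    have ht' : t < hi - lo := by simpa using (by simpa using ht : t < ((bs.drop lo).take (hi - lo)).length).trans_le (by simp)
    have htb : lo + t < bs.length := by
      have := (by simpa using ht : t < ((bs.drop lo).take (hi - lo)).length)
      simp at this; omega
    refine ⟨lo + t, by omega, by omega, ?_⟩
    rw [List.getD_eq_getElem _ _ (by omega)]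
    rw [List.getElem_take, List.getElem_drop] at hval
    rw [hval]; exact hat
  · rintro ⟨k, hlk, hkh, hkt⟩
    have hpos : 0 < ((bs.drop lo).take (hi - lo)).countP (fun b => b) := by
      rw [List.countP_pos_iff]
      refine ⟨true, ?_, rfl⟩
      rw [List.mem_iff_getElem]
      refine ⟨k - lo, by simp; omega, ?_⟩
      rw [List.getElem_take, List.getElem_drop]
      rw [List.getD_eq_getElem _ _ (by omega)] at hkt
      rw [← hkt]; congr 1; omega
    omega

theorem bridge (bs : List Bool) (tol : Int) (i : Nat) (hin : i < bs.length) :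
    specVal bs tol i = altVal bs tol i := by
  unfold specVal altVal
  by_cases h1 : bs.getD i false = true
  · rw [if_pos h1, h1]; simp
  · have h1' : bs.getD i false = false := by simpa using h1
    rw [if_neg h1, h1']
    simp only [Bool.false_or]
    by_cases h2 : (decide (0 < i) && bs.getD (i - 1) false) = true
    · rw [if_pos h2, h2]; simp
    · have h2' : (decide (0 < i) && bs.getD (i - 1) false) = false := by simpa using h2
      rw [if_neg h2, h2']
      simp only [Bool.false_or]
      by_cases htol : tol ≥ 1
      · rw [if_pos htol]
        have hlo' : (0:Int) ≤ max 0 ((i : Int) - tol + 1) := le_max_left _ _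
        have hhi0 : (0:Int) ≤ min (bs.length : Int) ((i : Int) + tol) := by
          simp only [le_min_iff]
          exact ⟨by exact_mod_cast Nat.zero_le _, by omega⟩
        set lo : Nat := (max 0 ((i : Int) - tol + 1)).toNat with hlodef
        set hi : Nat := (min (bs.length : Int) ((i : Int) + tol)).toNat with hhidef
        have hloc : (lo : Int) = max 0 ((i : Int) - tol + 1) := Int.toNat_of_nonneg hlo'
        have hhic : (hi : Int) = min (bs.length : Int) ((i : Int) + tol) :=
          Int.toNat_of_nonneg hhi0
        have hhn : hi ≤ bs.length := by omega
        have hlh : lo ≤ hi := by omega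
        rw [← hloc, ← hhic, prefAt bs lo (by omega), prefAt bs hi hhn]
        rw [Bool.eq_iff_iff, List.any_eq_true, decide_eq_true_iff, gt_iff_lt, Nat.cast_lt,
          count_window bs lo hi hlh hhn]
        constructor
        · rintro ⟨j, hj, hc⟩
          rw [PySem.List.mem_pyRange_one] at hj
          rw [decide_eq_true_iff] at hc
          obtain ⟨hge, hlt, hval⟩ := hc
          refine ⟨((i : Int) + j).toNat, by omega, by omega, ?_⟩
          rw [PySem.List.pyGetD_eq_getElem bs false hge (by exact_mod_cast hlt)] at hval
          rw [List.getD_eq_getElem _ _ (by omega)]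
          exact hval
        · rintro ⟨k, hlk, hkh, hkt⟩
          refine ⟨(k : Int) - i, ?_, ?_⟩
          · rw [PySem.List.mem_pyRange_one]; omega
          · rw [decide_eq_true_iff]
            refine ⟨by omega, by omega, ?_⟩
            rw [show (i : Int) + ((k : Int) - i) = (k : Int) from by ring, PySem.List.pyGetD_natCast]
            rw [List.getD_eq_getElem _ _ (by omega)] at hkt ⊢
            exact hkt
      · rw [if_neg htol, PySem.List.pyRange_one_eq_nil (by omega)]
        simp

-- ===== VERDICT (by name: the statement is the Claim_ definition above) =====
theorem clusterSingleEvent_spec : Claim_equal_clusterSingleEvent := by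
  intro bs tol _
  unfold Spec_clusterSingleEvent
  rw [A_char, B_char]
  exact List.map_congr_left (fun i h => bridge bs tol i (List.mem_range.mp h))
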